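-- pv_equiv track=rewrite | github.com/FlorentinJonckans/2048-remastered | projet 2048 -cori/alpha.py | regroupement
-- ===== SOURCE A (Python) =====
-- def regroupement(tm):
--
-- 	for i in range (len(tm)-1):
--
-- 		if tm[i]==tm[i+1] :
-- 				tm[i]=tm[i]*2
-- 				tm[i+1]=0
--
-- 	k=0
-- 	for i in range (len(tm)):
-- 		i=i-k
-- 		if tm[i]==0:
-- 			del tm[i]
-- 			k+=1
--
-- 	return tm
-- ===== SOURCE B (Python) =====
-- def regroupement(tm):
--     res = []
--     j = 0
--     n = len(tm)
--     while j < n: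
--         if j + 1 < n and tm[j] == tm[j + 1]:
--             v = tm[j] * 2
--             j += 2
--         else:
--             v = tm[j]
--             j += 1
--         if v != 0:
--             res.append(v)
--     tm[:] = res
--     return tm
-- ===== Notes on version B (the rewrite author's own statement) =====
-- stated objective: faster
-- what changed: Replaces A's two passes (in-place adjacent-merge zeroing pass followed by an index/k delete-loop whose del makes it quadratic) with a single left-to-right pass that pairs equal neighbours with a step-2 index and appends only non-zero values, then writes the result back into tm in place.
import Mathlib
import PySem

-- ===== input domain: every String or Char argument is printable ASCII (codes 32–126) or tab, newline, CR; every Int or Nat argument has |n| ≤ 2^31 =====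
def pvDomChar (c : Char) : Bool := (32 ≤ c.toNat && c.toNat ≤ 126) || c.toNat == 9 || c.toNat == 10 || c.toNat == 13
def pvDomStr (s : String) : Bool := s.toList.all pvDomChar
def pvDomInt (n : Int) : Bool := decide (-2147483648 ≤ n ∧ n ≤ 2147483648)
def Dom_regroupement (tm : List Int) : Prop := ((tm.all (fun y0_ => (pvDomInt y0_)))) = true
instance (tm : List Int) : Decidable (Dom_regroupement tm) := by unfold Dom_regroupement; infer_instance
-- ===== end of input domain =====

-- B is a single combined pass (pair-and-filter) instead of A's two passes; equivalence is about
-- the return value (both Pythons also mutate tm in place to that same value).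

-- ===== PORT A =====
-- A's first loop walks i = 0 … len-2 comparing tm[i] with tm[i+1]; a merge writes tm[i]*2 at i
-- and 0 at i+1, and only positions ≥ i are read afterwards.  Ported as the structural recursion
-- over the same traversal, with the written 0 carried explicitly in the list state.
def pvPass1 : List Int → List Int
  | [] => []
  | [a] => [a]
  | a :: b :: rest =>
      if a = b then a * 2 :: pvPass1 (0 :: rest) else a :: pvPass1 (b :: rest)
termination_by l => l.length
decreasing_by all_goals simp

-- A's second loop (index i-k with del and k+=1) re-addresses the next unprocessed element each
-- iteration, i.e. it scans the list left to right deleting every 0; ported as that scan.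
def pvPass2 : List Int → List Int
  | [] => []
  | x :: r => if x = 0 then pvPass2 r else x :: pvPass2 r

def regroupement (tm : List Int) : List Int := pvPass2 (pvPass1 tm)

-- ===== PORT B =====
-- Source B's while loop over index j: pair j,j+1 when equal (advance 2) else take tm[j] (advance 1),
-- appending only non-zero values.
def pvScan : List Int → List Int
  | [] => []
  | [a] => if a ≠ 0 then [a] else []
  | a :: b :: rest =>
      if a = b then
        (if a * 2 ≠ 0 then a * 2 :: pvScan rest else pvScan rest)
      else
        (if a ≠ 0 then a :: pvScan (b :: rest) else pvScan (b :: rest))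

def regroupement_alt (tm : List Int) : List Int := pvScan tm

-- ===== PRECONDITION & SPEC =====
def Spec_regroupement (tm : List Int) (out : List Int) : Prop := out = regroupement_alt tm
instance (tm : List Int) (out : List Int) : Decidable (Spec_regroupement tm out) := by unfold Spec_regroupement; infer_instance

-- ===== CLAIM (what is proved, stated in full; the proofs are below) =====
def Claim_equal_regroupement : Prop := ∀ (tm : List Int), Dom_regroupement tm → Spec_regroupement tm (regroupement tm)

-- ===== LEMMAS AND PROOFS =====

-- a leading 0 never pairs with a non-zero and contributes nothing after filtering
theorem pvScan_zero_cons (m : List Int) : pvScan (0 :: m) = pvScan m := by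
  match m with
  | [] => rfl
  | c :: r =>
    by_cases hc : (0 : Int) = c
    · subst hc
      have ih := pvScan_zero_cons r
      simp [pvScan] at ih ⊢
      exact ih.symm ▸ rfl
    · simp [pvScan, hc]
termination_by m.length

theorem pvKey (l : List Int) : pvPass2 (pvPass1 l) = pvScan l := by
  match l with
  | [] => simp [pvPass1, pvPass2, pvScan]
  | [a] => by_cases ha : a = 0 <;> simp [pvPass1, pvPass2, pvScan, ha]
  | a :: b :: rest =>
    by_cases h : a = b
    · subst h
      have ih := pvKey (0 :: rest)
      by_cases ha : a = 0 <;>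
        simp [pvPass1, pvPass2, pvScan, ih, pvScan_zero_cons, ha, mul_eq_zero]
    · have ih := pvKey (b :: rest)
      by_cases ha : a = 0
      · subst ha; simp [pvPass1, pvPass2, pvScan, h, ih]
      · simp [pvPass1, pvPass2, pvScan, h, ih, ha]
termination_by l.length

-- ===== VERDICT (by name: the statement is the Claim_ definition above) =====
theorem regroupement_spec : Claim_equal_regroupement := by
  intro tm _
  unfold Spec_regroupement regroupement regroupement_alt
  exact pvKey tm
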